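-- pv_equiv track=rewrite | github.com/yazhsab/slms-separator-local-magic | benchmarks/generate_tree_resource_network.py | clustered_nodes
-- ===== SOURCE A (Python) =====
-- def clustered_nodes(children):
--     if not children[0]:
--         return {0}
--     root_child = min(children[0])
--     out = set()
--     stack = [root_child]
--     while stack:
--         node = stack.pop()
--         out.add(node)
--         stack.extend(children[node])
--     return out
-- ===== SOURCE B (Python) =====
-- def clustered_nodes(children):
--     if not children[0]:
--         return {0}
--     out = set()
--
--     def visit(node):
--         out.add(node)
--         for child in reversed(children[node]):
--             visit(child)
--
--     visit(min(children[0]))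
--     return out
-- ===== Notes on version B (the rewrite author's own statement) =====
-- stated objective: alternative
-- what changed: The explicit stack/pop/extend worklist loop is replaced by a recursive depth-first visit helper that uses the call stack and iterates each node's children directly.
-- outside the precondition, e.g. on clustered_nodes({}): A raises KeyError, B raises KeyError
import Mathlib
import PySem

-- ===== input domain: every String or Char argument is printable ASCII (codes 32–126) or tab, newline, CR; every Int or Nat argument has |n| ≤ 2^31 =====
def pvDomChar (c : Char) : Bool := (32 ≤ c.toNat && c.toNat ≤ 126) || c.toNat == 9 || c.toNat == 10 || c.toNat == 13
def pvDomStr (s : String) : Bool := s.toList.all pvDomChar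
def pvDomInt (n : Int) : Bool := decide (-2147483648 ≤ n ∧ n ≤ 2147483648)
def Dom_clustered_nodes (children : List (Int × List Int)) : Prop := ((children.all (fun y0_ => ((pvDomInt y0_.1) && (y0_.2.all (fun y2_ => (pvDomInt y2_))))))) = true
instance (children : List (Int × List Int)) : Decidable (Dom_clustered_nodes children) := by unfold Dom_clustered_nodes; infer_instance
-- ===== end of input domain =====

-- B replaces A's explicit stack/pop/extend worklist loop by a recursive depth-first visit (same return value).
-- Both ports carry a fuel counter (one unit per visited node) only to make the recursion total in Lean; on every
-- input admitted by Pre_ the fuel (∏ over entries of (1 + number of children), an upper bound on the walks the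
-- loop pops) is never exhausted, so the ports compute exactly their Pythons' values.

-- children[n] of the Python dict
def childListOf (children : List (Int × List Int)) (n : Int) : List Int :=
  (PySem.Dict.mk children).getD n []

-- fuel bound shared by both ports: the number of nodes A pops equals the number of walks from the root child,
-- which on acyclic inputs is at most this product
def pvFuel (children : List (Int × List Int)) : Nat :=
  children.foldl (fun acc p => acc * (p.2.length + 1)) 1

-- ===== PORT A =====
-- the Python stack (pop from the END) is modelled with the head of the list as the top of the stack:
-- 'stack.extend(cs); stack.pop()' pops cs's last element first, i.e. prepend cs.reverse and pop the head.
def aLoop (children : List (Int × List Int)) : Nat → List Int → PySem.Set Int → PySem.Set Int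
  | 0, _, out => out
  | _ + 1, [], out => out
  | f + 1, node :: stack, out =>
      aLoop children f ((childListOf children node).reverse ++ stack)
        (PySem.Set.add out node)

def clustered_nodes (children : List (Int × List Int)) : List Int :=
  if childListOf children 0 = [] then [0]
  else
    match PySem.List.min? (childListOf children 0) (fun x => x) with
    | none => []   -- unreachable: the guard ensures children[0] is nonempty
    | some root_child => aLoop children (pvFuel children) [root_child] PySem.Set.empty

-- ===== PORT B =====
-- port of B's recursive 'visit' together with its 'for child in reversed(children[node])' loop:
-- bGo fuel pending out processes the pending sibling list; the head's visit is the inner recursive call.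
-- The remaining fuel is returned (with the invariant p.2 ≤ fuel, used only for termination).
def bGo (children : List (Int × List Int)) :
    (fuel : Nat) → List Int → PySem.Set Int → {p : PySem.Set Int × Nat // p.2 ≤ fuel}
  | fuel, [], out => ⟨(out, fuel), Nat.le_refl _⟩
  | 0, _ :: _, out => ⟨(out, 0), Nat.le_refl _⟩
  | f + 1, n :: ns, out =>
      -- visit n: add it, then recurse into its children (reversed), then continue with the siblings ns
      match bGo children f ((childListOf children n).reverse) (PySem.Set.add out n) with
      | ⟨(o1, f1), h1⟩ =>
        match bGo children f1 ns o1 with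
        | ⟨(o2, f2), h2⟩ => ⟨(o2, f2), by omega⟩
  termination_by fuel ns _ => (fuel, ns.length)
  decreasing_by
  · exact Prod.Lex.left _ _ (Nat.lt_succ_self f)
  · exact Prod.Lex.left _ _ (Nat.lt_succ_of_le h1)

def clustered_nodes_alt (children : List (Int × List Int)) : List Int :=
  if childListOf children 0 = [] then [0]
  else
    match PySem.List.min? (childListOf children 0) (fun x => x) with
    | none => []   -- unreachable: the guard ensures children[0] is nonempty
    | some root_child => (bGo children (pvFuel children) [root_child] PySem.Set.empty).val.1

-- ===== PRECONDITION & SPEC =====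
-- reachability closure used only by Pre_: nodes reachable from the start set, computed as a bounded
-- monotone fixpoint (the bound exceeds the number of distinct reachable values, so it IS the closure)
def reachStep (children : List (Int × List Int)) (S : List Int) : List Int :=
  (S ++ S.flatMap (childListOf children)).dedup

def reachN (children : List (Int × List Int)) : Nat → List Int → List Int
  | 0, S => S
  | k + 1, S => reachN children k (reachStep children S)

def reachFrom (children : List (Int × List Int)) (start : List Int) : List Int :=
  reachN children ((children.flatMap Prod.snd).length + 1) start

-- Pre_ holds exactly on the inputs where the Python A RETURNS: key 0 must exist (else KeyError), and — unless
-- children[0] is empty — every node reachable from min(children[0]) must be a key (else KeyError on a pop) and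
-- no reachable node may lie on a cycle (else the worklist loop never terminates).  Nothing on which A returns a
-- value is excluded.
def Pre_clustered_nodes (children : List (Int × List Int)) : Prop :=
  0 ∈ children.map Prod.fst ∧
    (childListOf children 0 = [] ∨
      (∀ n ∈ reachFrom children [(PySem.List.min? (childListOf children 0) (fun x => x)).getD 0],
        n ∈ children.map Prod.fst ∧ n ∉ reachFrom children (childListOf children n)))
instance (children : List (Int × List Int)) : Decidable (Pre_clustered_nodes children) := by
  unfold Pre_clustered_nodes; infer_instance

def pvWitness_clustered_nodes : (List (Int × List Int)) := [(0, [2, 1]), (1, [3, 3]), (2, []), (3, [])]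

def Spec_clustered_nodes (children : List (Int × List Int)) (out : List Int) : Prop := out = clustered_nodes_alt children
instance (children : List (Int × List Int)) (out : List Int) : Decidable (Spec_clustered_nodes children out) := by unfold Spec_clustered_nodes; infer_instance

-- ===== CLAIM (what is proved, stated in full; the proofs are below) =====
def Claim_equal_clustered_nodes : Prop := ∀ (children : List (Int × List Int)), Dom_clustered_nodes children → Pre_clustered_nodes children → Spec_clustered_nodes children (clustered_nodes children)

-- ===== LEMMAS AND PROOFS =====

lemma aLoop_nil (children : List (Int × List Int)) (fuel : Nat) (out : PySem.Set Int) :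
    aLoop children fuel [] out = out := by
  cases fuel <;> rfl

-- the stack loop on xs ++ ys runs B's recursion on xs first (same fuel accounting), then continues with ys
lemma aLoop_bGo (children : List (Int × List Int)) :
    ∀ fuel xs ys out, aLoop children fuel (xs ++ ys) out
      = aLoop children (bGo children fuel xs out).val.2 ys (bGo children fuel xs out).val.1 := by
  intro fuel
  induction fuel using Nat.strong_induction_on with
  | _ fuel ih =>
    intro xs ys out
    match xs with
    | [] => simp [bGo]
    | n :: ns =>
      match fuel with
      | 0 => simp [aLoop, bGo]
      | f + 1 =>
        rw [List.cons_append]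
        show aLoop children f
            ((childListOf children n).reverse ++ (ns ++ ys)) (PySem.Set.add out n) = _
        rcases h1 : bGo children f ((childListOf children n).reverse)
            (PySem.Set.add out n) with ⟨⟨o1, f1⟩, hle1⟩
        rw [ih f (Nat.lt_succ_self f) _ (ns ++ ys) (PySem.Set.add out n), h1]
        rcases h2 : bGo children f1 ns o1 with ⟨⟨o2, f2⟩, hle2⟩
        rw [ih f1 (Nat.lt_succ_of_le hle1) ns ys o1, h2]
        rw [bGo, h1]
        simp [h2]

-- ===== VERDICT (by name: the statement is the Claim_ definition above) =====
theorem clustered_nodes_spec : Claim_equal_clustered_nodes := by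
  intro children _ _
  unfold Spec_clustered_nodes clustered_nodes clustered_nodes_alt
  split
  · rfl
  · cases h : PySem.List.min? (childListOf children 0) (fun x => x) with
    | none => rfl
    | some rc =>
      have := aLoop_bGo children (pvFuel children) [rc] [] PySem.Set.empty
      simpa [aLoop_nil] using this
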